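-- pv_equiv track=rewrite | github.com/PyroGenesis/Codiq | LeetCode/2306-Naming-a-Company.py | distinctNamesGroupByPrefix
-- ===== SOURCE A (Python) =====
-- from typing import List
--
-- def distinctNamesGroupByPrefix(ideas: List[str]) -> int:
--     letter_idx = {c: i for i, c in enumerate('abcdefghijklmnopqrstuvwxyz')}
--     groups = [set() for _ in range(26)]
--     companies = 0
--     for idea in ideas:
--         groups[letter_idx[idea[0]]].add(idea[1:])
--
--     for i in range(26):
--         for j in range(i+1, 26):
--             mutual_count = len(groups[i] & groups[j])
--             companies += (len(groups[i]) - mutual_count) * (len(groups[j]) - mutual_count) * 2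
--
--     return companies
-- ===== SOURCE B (Python) =====
-- from typing import List
--
-- def distinctNamesGroupByPrefix(ideas: List[str]) -> int:
--     pool = set(ideas)
--
--     def size(c):
--         return sum(1 for x in pool if x[0] == c)
--
--     def mutual(a, b):
--         return sum(1 for x in pool if x[0] == a and b + x[1:] in pool)
--
--     total = 0
--     for i in range(26):
--         a = chr(97 + i)
--         si = size(a)
--         for j in range(i + 1, 26):
--             b = chr(97 + j)
--             m = mutual(a, b)
--             total += (si - m) * (size(b) - m) * 2
--     return total
-- ===== Notes on version B (the rewrite author's own statement) =====
-- stated objective: alternative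
-- what changed: B replaces A's 26 per-letter suffix sets and pairwise set intersections by one deduplicated pool of whole names queried with swap-membership probes (b + x[1:] in pool), computing group sizes and mutual counts by counting over the pool.
import Mathlib
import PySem

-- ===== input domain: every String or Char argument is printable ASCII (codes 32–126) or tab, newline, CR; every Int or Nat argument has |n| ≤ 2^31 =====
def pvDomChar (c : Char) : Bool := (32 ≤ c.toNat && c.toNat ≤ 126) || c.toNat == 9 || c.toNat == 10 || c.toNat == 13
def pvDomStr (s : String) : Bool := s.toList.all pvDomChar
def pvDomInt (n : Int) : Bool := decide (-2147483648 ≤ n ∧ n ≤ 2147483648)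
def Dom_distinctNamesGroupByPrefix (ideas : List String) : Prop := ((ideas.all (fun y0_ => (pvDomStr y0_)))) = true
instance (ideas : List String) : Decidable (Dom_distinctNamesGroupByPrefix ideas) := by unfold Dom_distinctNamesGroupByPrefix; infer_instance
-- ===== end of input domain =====

set_option maxRecDepth 4000


-- B replaces A's 26 per-letter suffix sets and pairwise set intersections by one deduplicated
-- pool of whole names queried with swap-membership probes; alternative structure, similar cost.

-- ===== PORT A =====
-- Strings are handled on their code-point lists (List Char), exact for Python str.
def pvLetters : List Char :=
  ['a','b','c','d','e','f','g','h','i','j','k','l','m',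
   'n','o','p','q','r','s','t','u','v','w','x','y','z']

-- letter_idx = {c: i for i, c in enumerate('abc…z')}
def pvLetterIdx : PySem.Dict Char Int :=
  (PySem.List.enumerate pvLetters).foldl (fun d p => d.insert p.2 p.1) PySem.Dict.empty

-- loop body: groups[letter_idx[idea[0]]].add(idea[1:])
def pvStepA (gs : List (PySem.Set (List Char))) (idea : String) : List (PySem.Set (List Char)) :=
  match PySem.List.pyGet? idea.toList 0 with
  | none => gs        -- Python raises IndexError here (excluded by Pre_)
  | some c =>
    match pvLetterIdx.get? c with
    | none => gs      -- Python raises KeyError here (excluded by Pre_)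
    | some k =>
      PySem.List.pySetD gs k
        ((PySem.List.pyGetD gs k PySem.Set.empty).add (PySem.List.slice idea.toList (some 1) none))

def distinctNamesGroupByPrefix (ideas : List String) : Int :=
  let groups := ideas.foldl pvStepA (List.replicate 26 PySem.Set.empty)
  (PySem.List.pyRange 0 26 1).foldl (fun companies i =>
    (PySem.List.pyRange (i+1) 26 1).foldl (fun companies j =>
      let gi := PySem.List.pyGetD groups i PySem.Set.empty
      let gj := PySem.List.pyGetD groups j PySem.Set.empty
      let mutual_count : Int := PySem.Set.len (PySem.Set.inter gi gj)
      companies + (PySem.Set.len gi - mutual_count) * (PySem.Set.len gj - mutual_count) * 2)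
      companies) 0

-- ===== PORT B =====
-- size(c) = sum(1 for x in pool if x[0] == c)
def pvSize (pool : PySem.Set (List Char)) (c : Char) : Int :=
  ((pool.filter (fun x => x.head? == some c)).length : Int)

-- mutual(a, b) = sum(1 for x in pool if x[0] == a and b + x[1:] in pool)
def pvMutual (pool : PySem.Set (List Char)) (a b : Char) : Int :=
  ((pool.filter (fun x => x.head? == some a && PySem.Set.contains pool (b :: x.tail))).length : Int)

def distinctNamesGroupByPrefix_alt (ideas : List String) : Int :=
  let pool : PySem.Set (List Char) := PySem.Set.ofList (ideas.map String.toList)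
  (PySem.List.pyRange 0 26 1).foldl (fun total i =>
    let a := Char.ofNat (97 + i).toNat
    let si := pvSize pool a
    (PySem.List.pyRange (i+1) 26 1).foldl (fun total j =>
      let b := Char.ofNat (97 + j).toNat
      let m := pvMutual pool a b
      total + (si - m) * (pvSize pool b - m) * 2) total) 0

-- ===== PRECONDITION & SPEC =====
-- Pre_ excludes exactly the inputs on which A raises: an empty idea (IndexError on idea[0])
-- or an idea whose first character is not a lowercase letter a-z (KeyError in letter_idx).
def pvOkIdea (s : String) : Bool :=
  match s.toList with
  | [] => false
  | c :: _ => decide (97 ≤ c.toNat ∧ c.toNat ≤ 122)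

def Pre_distinctNamesGroupByPrefix (ideas : List String) : Prop :=
  ∀ s ∈ ideas, pvOkIdea s = true
instance (ideas : List String) : Decidable (Pre_distinctNamesGroupByPrefix ideas) := by
  unfold Pre_distinctNamesGroupByPrefix; infer_instance

def pvWitness_distinctNamesGroupByPrefix : List String := ["coffee", "donuts", "time", "toffee"]

def Spec_distinctNamesGroupByPrefix (ideas : List String) (out : Int) : Prop :=
  out = distinctNamesGroupByPrefix_alt ideas
instance (ideas : List String) (out : Int) : Decidable (Spec_distinctNamesGroupByPrefix ideas out) := by
  unfold Spec_distinctNamesGroupByPrefix; infer_instance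

-- ===== CLAIM (what is proved, stated in full; the proofs are below) =====
def Claim_equal_distinctNamesGroupByPrefix : Prop :=
  ∀ (ideas : List String), Dom_distinctNamesGroupByPrefix ideas →
    Pre_distinctNamesGroupByPrefix ideas →
    Spec_distinctNamesGroupByPrefix ideas (distinctNamesGroupByPrefix ideas)

-- ===== LEMMAS AND PROOFS =====

-- the letter character of group k
def pvLC (k : Nat) : Char := Char.ofNat (97 + k)

lemma pvLC_toNat (k : Nat) (hk : k < 26) : (pvLC k).toNat = 97 + k := by
  interval_cases k <;> decide

lemma pvLC_inj (k k' : Nat) (hk : k < 26) (hk' : k' < 26) (h : pvLC k = pvLC k') : k = k' := by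
  have := congrArg Char.toNat h
  rw [pvLC_toNat k hk, pvLC_toNat k' hk'] at this
  omega

lemma pvLetterIdx_get_aux (n : Nat) (h1 : 97 ≤ n) (h2 : n ≤ 122) :
    pvLetterIdx.get? (Char.ofNat n) = some ((n:Int) - 97) := by
  interval_cases n <;> decide

lemma pvLetterIdx_get (c : Char) (h1 : 97 ≤ c.toNat) (h2 : c.toNat ≤ 122) :
    pvLetterIdx.get? c = some ((c.toNat : Int) - 97) := by
  have := pvLetterIdx_get_aux c.toNat h1 h2
  rwa [Char.ofNat_toNat] at this

lemma pvLC_of_char (c : Char) (h1 : 97 ≤ c.toNat) (h2 : c.toNat ≤ 122) :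
    pvLC (c.toNat - 97) = c := by
  unfold pvLC
  have h : 97 + (c.toNat - 97) = c.toNat := by omega
  rw [h, Char.ofNat_toNat]

-- the group predicate: names whose first letter is letter k
def pvP (k : Nat) (x : List Char) : Bool := x.head? == some (pvLC k)

lemma pvP_shape {k : Nat} {x : List Char} (h : pvP k x = true) : x = pvLC k :: x.tail := by
  cases x with
  | nil => simp [pvP] at h
  | cons a t => simp [pvP] at h; simp [h]

-- membership transfer: suffixes of group k vs whole names in the pool
lemma pvMemTail (pool : List (List Char)) (k : Nat) (t : List Char) :
    t ∈ (pool.filter (pvP k)).map List.tail ↔ (pvLC k :: t) ∈ pool := by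
  constructor
  · rintro h
    obtain ⟨y, hy, rfl⟩ := List.mem_map.mp h
    have hyf := List.mem_filter.mp hy
    have := pvP_shape hyf.2
    rw [← this]; exact hyf.1
  · intro h
    exact List.mem_map.mpr ⟨pvLC k :: t, List.mem_filter.mpr ⟨h, by simp [pvP]⟩, rfl⟩

-- the pool of B
def pvPool (ideas : List String) : PySem.Set (List Char) :=
  PySem.Set.ofList (ideas.map String.toList)

lemma pvStepA_length (gs : List (PySem.Set (List Char))) (s : String) :
    (pvStepA gs s).length = gs.length := by
  unfold pvStepA
  split
  · rfl
  split
  · rfl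
  · exact PySem.List.length_pySetD _ _ _

lemma pvGroups_length (ideas : List String) (init : List (PySem.Set (List Char))) :
    (ideas.foldl pvStepA init).length = init.length := by
  induction ideas generalizing init with
  | nil => rfl
  | cons s l ih => rw [List.foldl_cons, ih, pvStepA_length]

lemma pvStepA_eq (gs : List (PySem.Set (List Char)))
    (s : String) {c : Char} {t : List Char} (hst : s.toList = c :: t)
    (h1 : 97 ≤ c.toNat) (h2 : c.toNat ≤ 122) :
    pvStepA gs s =
      gs.set (c.toNat - 97)
        (PySem.Set.add (gs.getD (c.toNat - 97) PySem.Set.empty) t) := by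
  unfold pvStepA
  rw [hst]
  have hi : ((c.toNat : Int) - 97) = ((c.toNat - 97 : Nat) : Int) := by omega
  simp only [PySem.List.pyGet?_zero_cons, pvLetterIdx_get c h1 h2,
    PySem.List.slice_from_one, List.tail_cons, hi,
    PySem.List.pySetD_natCast, PySem.List.pyGetD_natCast]

-- fold invariant: groups[k] holds exactly the suffixes of the pool names whose first
-- letter is letter k, in pool order
lemma pvInv (ideas : List String) :
    (∀ s ∈ ideas, pvOkIdea s = true) → ∀ k : Nat, k < 26 →
    (ideas.foldl pvStepA (List.replicate 26 PySem.Set.empty))[k]? =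
      some (((pvPool ideas).filter (pvP k)).map List.tail) := by
  induction ideas using List.reverseRecOn with
  | nil =>
    intro _ k hk
    rw [List.foldl_nil, List.getElem?_replicate]
    simp [hk, pvPool]
  | append_singleton l s ih =>
    intro h k hk
    have hok : pvOkIdea s = true := h s (by simp)
    have hl : ∀ x ∈ l, pvOkIdea x = true := fun x hx => h x (by simp [hx])
    obtain ⟨c, t, hst, h1, h2⟩ : ∃ c t, s.toList = c :: t ∧ 97 ≤ c.toNat ∧ c.toNat ≤ 122 := by
      unfold pvOkIdea at hok
      rcases hcl : s.toList with _ | ⟨c, t⟩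
      · rw [hcl] at hok; simp at hok
      · rw [hcl] at hok; simp at hok; exact ⟨c, t, rfl, hok⟩
    set gs := l.foldl pvStepA (List.replicate 26 PySem.Set.empty) with hgsdef
    have hgs : gs.length = 26 := by rw [hgsdef, pvGroups_length]; simp
    set pool := pvPool l with hpooldef
    have hfold : (l ++ [s]).foldl pvStepA (List.replicate 26 PySem.Set.empty) = pvStepA gs s := by
      rw [List.foldl_append, List.foldl_cons, List.foldl_nil]
    have hpool : pvPool (l ++ [s]) = PySem.Set.add pool (c :: t) := by
      rw [hpooldef]
      unfold pvPool
      rw [List.map_append, List.map_singleton, PySem.Set.ofList_append_singleton, hst]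
    have hk₀ : c.toNat - 97 < 26 := by omega
    have hck : pvLC (c.toNat - 97) = c := pvLC_of_char c h1 h2
    have hG : gs.getD (c.toNat - 97) PySem.Set.empty =
        (pool.filter (pvP (c.toNat - 97))).map List.tail := by
      have := ih hl (c.toNat - 97) hk₀
      rw [List.getD_eq_getElem?_getD, this]
      rfl
    rw [hfold, hpool, pvStepA_eq gs s hst h1 h2, hG]
    by_cases hkk : c.toNat - 97 = k
    · subst hkk
      rw [List.getElem?_set_self (by omega)]
      by_cases hmem : (c :: t) ∈ pool
      · have ht : t ∈ (pool.filter (pvP (c.toNat - 97))).map List.tail := by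
          rw [pvMemTail, hck]; exact hmem
        rw [PySem.Set.add_of_mem ht, PySem.Set.add_of_mem hmem]
      · have ht : t ∉ (pool.filter (pvP (c.toNat - 97))).map List.tail := by
          rw [pvMemTail, hck]; exact hmem
        rw [PySem.Set.add_of_not_mem ht, PySem.Set.add_of_not_mem hmem,
          List.filter_append]
        have hp : pvP (c.toNat - 97) (c :: t) = true := by simp [pvP, hck]
        simp [hp]
    · rw [List.getElem?_set_ne hkk, ih hl k hk]
      congr 2
      have hne : pvP k (c :: t) = false := by
        by_contra hx
        have hx' : pvP k (c :: t) = true := by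
          cases hx2 : pvP k (c :: t)
          · exact absurd hx2 hx
          · rfl
        have hsh := pvP_shape hx'
        simp at hsh
        exact hkk (pvLC_inj (c.toNat - 97) k hk₀ hk (by rw [hck, hsh]))
      by_cases hmem : (c :: t) ∈ pool
      · rw [PySem.Set.add_of_mem hmem]
      · rw [PySem.Set.add_of_not_mem hmem, List.filter_append]
        simp [hne]

-- len of a group is B's size count
lemma pvSize_eq (pool : PySem.Set (List Char)) (k : Nat) :
    PySem.Set.len ((pool.filter (pvP k)).map List.tail) = pvSize pool (pvLC k) := by
  simp [PySem.Set.len, pvSize]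
  rfl

-- len of an intersection of two groups is B's mutual count
lemma pvMutual_eq (pool : PySem.Set (List Char)) (ki kj : Nat) :
    PySem.Set.len
      (PySem.Set.inter ((pool.filter (pvP ki)).map List.tail)
        ((pool.filter (pvP kj)).map List.tail)) =
      pvMutual pool (pvLC ki) (pvLC kj) := by
  have hinter : ∀ (s tt : PySem.Set (List Char)),
      PySem.Set.inter s tt = s.filter (fun x => tt.contains x) := by
    intro s tt; simp [PySem.Set.inter]
  rw [hinter]
  simp only [PySem.Set.len, pvMutual]
  congr 1
  rw [List.filter_map, List.length_map, List.filter_filter]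
  congr 1
  apply List.filter_congr
  intro x _
  simp only [Function.comp]
  rw [Bool.and_comm]
  congr 1
  rw [Bool.eq_iff_iff, PySem.Set.contains_iff, PySem.Set.contains_iff]
  exact pvMemTail pool kj x.tail

lemma pvMain (ideas : List String) (h : ∀ s ∈ ideas, pvOkIdea s = true) :
    distinctNamesGroupByPrefix ideas = distinctNamesGroupByPrefix_alt ideas := by
  unfold distinctNamesGroupByPrefix distinctNamesGroupByPrefix_alt
  simp only []
  apply PySem.List.foldl_congr_mem
  intro acc i hi
  rw [PySem.List.mem_pyRange_one] at hi
  apply PySem.List.foldl_congr_mem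
  intro acc' j hj
  rw [PySem.List.mem_pyRange_one] at hj
  have hgs : (ideas.foldl pvStepA (List.replicate 26 PySem.Set.empty)).length = 26 := by
    rw [pvGroups_length]; simp
  have hgetD : ∀ (x : Int), 0 ≤ x → x < 26 →
      PySem.List.pyGetD (ideas.foldl pvStepA (List.replicate 26 PySem.Set.empty)) x PySem.Set.empty =
        ((pvPool ideas).filter (pvP x.toNat)).map List.tail := by
    intro x hx0 hx26
    have hx : x = ((x.toNat : Nat) : Int) := by omega
    rw [hx, PySem.List.pyGetD_natCast, List.getD_eq_getElem?_getD,
      pvInv ideas h x.toNat (by omega)]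
    rfl
  have hchar : ∀ (x : Int), 0 ≤ x → Char.ofNat (97 + x).toNat = pvLC x.toNat := by
    intro x hx0
    unfold pvLC
    congr 1
    omega
  rw [hgetD i (by omega) (by omega), hgetD j (by omega) (by omega),
      hchar i (by omega), hchar j (by omega),
      pvSize_eq, pvSize_eq, pvMutual_eq]
  rfl

-- ===== VERDICT (by name: the statement is the Claim_ definition above) =====
theorem distinctNamesGroupByPrefix_spec : Claim_equal_distinctNamesGroupByPrefix := by
  intro ideas _ hpre
  unfold Spec_distinctNamesGroupByPrefix
  exact pvMain ideas hpre
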